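-- pv_equiv track=rewrite | github.com/nchen909/CodeRobustness | custom/attack/sast_distance_case.py | index_to_code_token
-- ===== SOURCE A (Python) =====
-- def index_to_code_token(start_point,end_point, code):
--     code = code.split('\n')
--     if start_point[0] == end_point[0]:
--         s = code[start_point[0]][start_point[1]:end_point[1]]
--     else:
--         s = ""
--         s += code[start_point[0]][start_point[1]:]
--         for i in range(start_point[0] + 1, end_point[0]):
--             s += code[i]
--         s += code[end_point[0]][:end_point[1]]
--     return s
-- ===== SOURCE B (Python) =====
-- def _clamp(c, m):
--     # Python slice-bound resolution on a sequence of length m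
--     if c < 0:
--         return max(0, m + c)
--     return min(c, m)
--
-- def index_to_code_token(start_point, end_point, code):
--     lines = code.split('\n')
--     body = ''.join(lines[i] for i in range(start_point[0], end_point[0] + 1))
--     drop = _clamp(start_point[1], len(lines[start_point[0]]))
--     cut = len(lines[end_point[0]]) - _clamp(end_point[1], len(lines[end_point[0]]))
--     return body[drop : len(body) - cut]
-- ===== Notes on version B (the rewrite author's own statement) =====
-- stated objective: alternative
-- what changed: Replaced A's same-line/multi-line branch with head-slice + middle loop + tail-slice assembly by a join-then-cut algorithm: concatenate every touched line into one flat string and take a single slice of it between two arithmetically resolved cut offsets.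
-- intended difference: On reversed spans (end line before start line, both in range) whose first-line tail or last-line head slice is nonempty, A accidentally returns that tail glued to that head, while B returns the empty string, the intended value for an empty span. — e.g. on index_to_code_token((1, 0), (0, 2), "ab\ncd"): A returns "cdab", B returns ""
import Mathlib
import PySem

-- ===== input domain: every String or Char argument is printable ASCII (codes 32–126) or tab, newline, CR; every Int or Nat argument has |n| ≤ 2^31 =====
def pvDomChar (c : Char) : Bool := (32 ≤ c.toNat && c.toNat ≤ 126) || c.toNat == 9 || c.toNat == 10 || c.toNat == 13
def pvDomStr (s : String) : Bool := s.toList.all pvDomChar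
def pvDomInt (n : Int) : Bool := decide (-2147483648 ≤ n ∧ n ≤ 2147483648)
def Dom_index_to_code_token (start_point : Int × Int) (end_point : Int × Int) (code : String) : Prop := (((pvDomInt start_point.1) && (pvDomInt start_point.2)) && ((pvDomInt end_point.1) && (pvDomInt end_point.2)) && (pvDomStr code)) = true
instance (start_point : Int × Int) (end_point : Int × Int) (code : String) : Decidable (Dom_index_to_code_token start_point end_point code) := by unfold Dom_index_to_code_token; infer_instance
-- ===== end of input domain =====

-- B replaces A's branch-and-three-part assembly (same-line slice vs head slice + middle loop + tail
-- slice) by a join-then-cut algorithm: concatenate every touched line into one flat string, then take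
-- a single slice of it between two arithmetically computed cut offsets (return value only).

-- ===== PORT A =====
def index_to_code_token (start_point : Int × Int) (end_point : Int × Int) (code : String) : String :=
  let lines := PySem.Chars.splitOn code.toList ['\n']
  if start_point.1 = end_point.1 then
    String.ofList (PySem.Chars.slice (PySem.List.pyGetD lines start_point.1 []) (some start_point.2) (some end_point.2))
  else
    let s : List Char := []
    let s := s ++ PySem.Chars.slice (PySem.List.pyGetD lines start_point.1 []) (some start_point.2) none
    let s := (PySem.List.pyRange (start_point.1 + 1) end_point.1 1).foldl
      (fun acc i => acc ++ PySem.List.pyGetD lines i []) s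
    let s := s ++ PySem.Chars.slice (PySem.List.pyGetD lines end_point.1 []) none (some end_point.2)
    String.ofList s

-- ===== PORT B =====
-- Source B's helper _clamp (Python slice-bound resolution on a sequence of length m)
def pvClamp (c : Int) (m : Int) : Int :=
  if c < 0 then max 0 (m + c) else min c m

def index_to_code_token_alt (start_point : Int × Int) (end_point : Int × Int) (code : String) : String :=
  let lines := PySem.Chars.splitOn code.toList ['\n']
  let body := (PySem.List.pyRange start_point.1 (end_point.1 + 1) 1).foldl
    (fun acc i => acc ++ PySem.List.pyGetD lines i []) []
  let drop := pvClamp start_point.2 (PySem.Chars.len (PySem.List.pyGetD lines start_point.1 []))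
  let cut := PySem.Chars.len (PySem.List.pyGetD lines end_point.1 [])
    - pvClamp end_point.2 (PySem.Chars.len (PySem.List.pyGetD lines end_point.1 []))
  String.ofList (PySem.Chars.slice body (some drop) (some (PySem.Chars.len body - cut)))

-- ===== PRECONDITION & SPEC =====
-- Pre_ excludes exactly the inputs with an out-of-range line index, where A raises IndexError.
def Pre_index_to_code_token (start_point : Int × Int) (end_point : Int × Int) (code : String) : Prop :=
  let lines := PySem.Chars.splitOn code.toList ['\n']
  PySem.Raise.InRange lines.length start_point.1 ∧ PySem.Raise.InRange lines.length end_point.1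
instance (start_point : Int × Int) (end_point : Int × Int) (code : String) : Decidable (Pre_index_to_code_token start_point end_point code) := by unfold Pre_index_to_code_token; infer_instance

def pvWitness_index_to_code_token : (Int × Int) × (Int × Int) × String := ((0, 1), (1, 2), "abc\ndef")

-- On reversed spans (end line before start line, both in range) whose first-line tail or
-- last-line head is nonempty, A accidentally returns that tail glued to that head, while B
-- returns "", the intended value for an empty span.
def D_index_to_code_token (start_point : Int × Int) (end_point : Int × Int) (code : String) : Prop :=
  let lines := PySem.Chars.splitOn code.toList ['\n']
  let head := PySem.List.pyGetD lines start_point.1 []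
  let tail := PySem.List.pyGetD lines end_point.1 []
  PySem.Raise.InRange lines.length start_point.1 ∧ PySem.Raise.InRange lines.length end_point.1 ∧
    end_point.1 < start_point.1 ∧
    (PySem.List.clampIdx head.length start_point.2 < head.length ∨
      0 < PySem.List.clampIdx tail.length end_point.2)
instance (start_point : Int × Int) (end_point : Int × Int) (code : String) : Decidable (D_index_to_code_token start_point end_point code) := by unfold D_index_to_code_token; infer_instance

def Spec_index_to_code_token (start_point : Int × Int) (end_point : Int × Int) (code : String) (out : String) : Prop := ¬ D_index_to_code_token start_point end_point code → out = index_to_code_token_alt start_point end_point code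
instance (start_point : Int × Int) (end_point : Int × Int) (code : String) (out : String) : Decidable (Spec_index_to_code_token start_point end_point code out) := by unfold Spec_index_to_code_token; infer_instance

def pvDiffWitness_index_to_code_token : (Int × Int) × (Int × Int) × String := ((1, 0), (0, 2), "ab\ncd")
def pvDiffWitnessOut_index_to_code_token : String × String := ("cdab", "")

-- ===== CLAIM (what is proved, stated in full; the proofs are below) =====
def Claim_unchanged_index_to_code_token : Prop := ∀ (start_point : Int × Int) (end_point : Int × Int) (code : String), Dom_index_to_code_token start_point end_point code → Pre_index_to_code_token start_point end_point code → Spec_index_to_code_token start_point end_point code (index_to_code_token start_point end_point code)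
def Claim_changed_index_to_code_token : Prop := Dom_index_to_code_token (pvDiffWitness_index_to_code_token.1) (pvDiffWitness_index_to_code_token.2.1) (pvDiffWitness_index_to_code_token.2.2) ∧ Pre_index_to_code_token (pvDiffWitness_index_to_code_token.1) (pvDiffWitness_index_to_code_token.2.1) (pvDiffWitness_index_to_code_token.2.2) ∧ D_index_to_code_token (pvDiffWitness_index_to_code_token.1) (pvDiffWitness_index_to_code_token.2.1) (pvDiffWitness_index_to_code_token.2.2) ∧ index_to_code_token (pvDiffWitness_index_to_code_token.1) (pvDiffWitness_index_to_code_token.2.1) (pvDiffWitness_index_to_code_token.2.2) = pvDiffWitnessOut_index_to_code_token.1 ∧ index_to_code_token_alt (pvDiffWitness_index_to_code_token.1) (pvDiffWitness_index_to_code_token.2.1) (pvDiffWitness_index_to_code_token.2.2) = pvDiffWitnessOut_index_to_code_token.2 ∧ pvDiffWitnessOut_index_to_code_token.1 ≠ pvDiffWitnessOut_index_to_code_token.2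
def Claim_exact_index_to_code_token : Prop := ∀ (start_point : Int × Int) (end_point : Int × Int) (code : String), Dom_index_to_code_token start_point end_point code → Pre_index_to_code_token start_point end_point code → D_index_to_code_token start_point end_point code → index_to_code_token start_point end_point code ≠ index_to_code_token_alt start_point end_point code

-- ===== LEMMAS AND PROOFS =====

-- Source B's _clamp computes exactly PySem's slice-bound clamp
lemma pvClamp_eq_clampIdx (c : Int) (n : Nat) :
    pvClamp c (n : Int) = (PySem.List.clampIdx n c : Int) := by
  simp [pvClamp, PySem.List.clampIdx]
  split_ifs <;> omega

lemma slice_none_some (xs : List Char) (b : Int) :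
    PySem.List.slice xs none (some b) = xs.take (PySem.List.clampIdx xs.length b) := by
  simp [PySem.List.slice]

-- a slice whose Int bounds are already-clamped Nat values is plain drop/take
lemma slice_natCast_clamped (xs : List Char) (a b : Nat) (ha : a ≤ xs.length) (hb : b ≤ xs.length) :
    PySem.List.slice xs (some (a : Int)) (some (b : Int)) = (xs.drop a).take (b - a) := by
  simp [PySem.List.slice, Nat.min_eq_left ha, Nat.min_eq_left hb]

-- A's value on a reversed span: the head slice glued to the tail slice (middle range empty)
lemma portA_reversed (sp ep : Int × Int) (code : String) (h : ep.1 < sp.1) :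
    index_to_code_token sp ep code =
      String.ofList
        (List.drop (PySem.List.clampIdx (PySem.List.pyGetD (PySem.Chars.splitOn code.toList ['\n']) sp.1 []).length sp.2)
            (PySem.List.pyGetD (PySem.Chars.splitOn code.toList ['\n']) sp.1 []) ++
          List.take (PySem.List.clampIdx (PySem.List.pyGetD (PySem.Chars.splitOn code.toList ['\n']) ep.1 []).length ep.2)
            (PySem.List.pyGetD (PySem.Chars.splitOn code.toList ['\n']) ep.1 [])) := by
  unfold index_to_code_token
  rw [if_neg (by omega), PySem.List.pyRange_one_eq_nil (by omega)]
  simp only [List.foldl_nil, List.nil_append, PySem.Chars.slice]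
  rw [PySem.List.slice_some_none, slice_none_some]

-- B's value on a reversed span: the joined body is empty, so the cut slice is empty
lemma portB_reversed (sp ep : Int × Int) (code : String) (h : ep.1 < sp.1) :
    index_to_code_token_alt sp ep code = "" := by
  unfold index_to_code_token_alt
  rw [PySem.List.pyRange_one_eq_nil (by omega)]
  simp [PySem.Chars.slice, PySem.List.slice, PySem.List.clampIdx]

theorem index_to_code_token_spec : Claim_unchanged_index_to_code_token := by
  intro sp ep code _ hpre hnd
  obtain ⟨h1, h2⟩ := hpre
  by_cases hs : sp.1 = ep.1
  · -- same line: the body is that single line; the two cut offsets are the two clamped bounds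
    unfold index_to_code_token index_to_code_token_alt
    rw [if_pos hs, hs, PySem.List.pyRange_one_singleton]
    simp only [List.foldl_cons, List.foldl_nil, List.nil_append, PySem.Chars.slice,
      PySem.Chars.len_eq, pvClamp_eq_clampIdx]
    set L := PySem.List.pyGetD (PySem.Chars.splitOn code.toList ['\n']) ep.1 [] with hL
    have hstop : ((L.length : Int) - ((L.length : Int) - (PySem.List.clampIdx L.length ep.2 : Int)))
        = ((PySem.List.clampIdx L.length ep.2 : Int)) := by omega
    rw [hstop, slice_natCast_clamped L _ _ (PySem.List.clampIdx_le _ _) (PySem.List.clampIdx_le _ _)]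
    simp [PySem.List.slice]
  · by_cases hle : sp.1 ≤ ep.1
    · -- forward multi-line span
      have hlt : sp.1 < ep.1 := lt_of_le_of_ne hle hs
      unfold index_to_code_token index_to_code_token_alt
      rw [if_neg hs]
      rw [PySem.List.pyRange_one_cons (show sp.1 < ep.1 + 1 by omega),
          PySem.List.pyRange_one_succ_right (show sp.1 + 1 ≤ ep.1 by omega)]
      simp only [List.foldl_cons, List.nil_append, PySem.List.foldl_append_eq_flatMap,
        List.foldl_append, List.foldl_cons, List.foldl_nil, PySem.Chars.slice,
        PySem.Chars.len_eq, pvClamp_eq_clampIdx]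
      set lines := PySem.Chars.splitOn code.toList ['\n'] with hlines
      set L1 := PySem.List.pyGetD lines sp.1 [] with hL1
      set L2 := PySem.List.pyGetD lines ep.1 [] with hL2
      set M := (PySem.List.pyRange (sp.1 + 1) ep.1 1).flatMap (fun i => PySem.List.pyGetD lines i []) with hM
      set ca := PySem.List.clampIdx L1.length sp.2 with hca
      set cb := PySem.List.clampIdx L2.length ep.2 with hcb
      have hca' : ca ≤ L1.length := PySem.List.clampIdx_le _ _
      have hcb' : cb ≤ L2.length := PySem.List.clampIdx_le _ _
      rw [PySem.List.slice_some_none, slice_none_some]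
      -- body = L1 ++ M ++ L2; its cut slice is drop ca of L1 glued to M and take cb of L2
      have hstop : (((L1 ++ M ++ L2).length : Int) - ((L2.length : Int) - (cb : Int)))
          = ((L1.length + M.length + cb : Nat) : Int) := by
        simp [List.length_append]; omega
      rw [hstop, slice_natCast_clamped (L1 ++ M ++ L2) ca (L1.length + M.length + cb)
        (by simp [List.length_append]; omega) (by simp [List.length_append]; omega)]
      have hbody : List.drop ca (L1 ++ M ++ L2) = L1.drop ca ++ (M ++ L2) := by
        rw [List.append_assoc, List.drop_append_of_le_length hca']
      have harith : L1.length + M.length + cb - ca = (L1.drop ca).length + (M.length + cb) := by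
        simp [List.length_drop]; omega
      rw [hbody, harith, List.take_append, List.take_append]
      simp only [List.length_drop, Nat.add_sub_cancel_left]
      rw [List.take_of_length_le (show (List.drop ca L1).length ≤ L1.length - ca + (M.length + cb) by
            simp only [List.length_drop]; omega),
          List.take_of_length_le (Nat.le_add_right M.length cb), List.append_assoc]
    · -- reversed span outside D_: both sides are the empty string
      have hrev : ep.1 < sp.1 := by omega
      have hcl : ¬(PySem.List.clampIdx (PySem.List.pyGetD (PySem.Chars.splitOn code.toList ['\n']) sp.1 []).length sp.2 < (PySem.List.pyGetD (PySem.Chars.splitOn code.toList ['\n']) sp.1 []).length ∨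
          0 < PySem.List.clampIdx (PySem.List.pyGetD (PySem.Chars.splitOn code.toList ['\n']) ep.1 []).length ep.2) :=
        fun hc => hnd ⟨h1, h2, hrev, hc⟩
      rcases not_or.mp hcl with ⟨ha, hb⟩
      rw [portA_reversed sp ep code hrev, portB_reversed sp ep code hrev]
      rw [List.drop_eq_nil_iff.mpr (by omega), List.nil_append,
          List.take_eq_nil_iff.mpr (Or.inl (by omega))]

theorem index_to_code_token_changed : Claim_changed_index_to_code_token := by
  unfold Claim_changed_index_to_code_token; decide

theorem index_to_code_token_tight : Claim_exact_index_to_code_token := by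
  intro sp ep code _ _ hd
  obtain ⟨h1, h2, hrev, hne⟩ := hd
  rw [portA_reversed sp ep code hrev, portB_reversed sp ep code hrev]
  intro h
  have h' := congrArg String.toList h
  simp only [String.toList_ofList] at h'
  rcases hne with hh | ht
  · have : (List.drop (PySem.List.clampIdx (PySem.List.pyGetD (PySem.Chars.splitOn code.toList ['\n']) sp.1 []).length sp.2)
        (PySem.List.pyGetD (PySem.Chars.splitOn code.toList ['\n']) sp.1 [])).length = 0 := by
      have := congrArg List.length h'
      simp at this
      omega
    simp [List.length_drop] at this
    omega
  · have := congrArg List.length h'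
    have hle := PySem.List.clampIdx_le
      (PySem.List.pyGetD (PySem.Chars.splitOn code.toList ['\n']) ep.1 []).length ep.2
    simp [List.length_take] at this
    omega
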